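-- pv_equiv track=rewrite | github.com/aksh3004/Yelp-data-set-analysis | yelping.py | findTopTen
-- ===== SOURCE A (Python) =====
-- def findTopTen(sortedCountList, mainList):
--     """
--     For the top ten businesses, find the count of check-ins from the original list
--     :param sortedCountList: the sorted list of all businesses
--     :param mainList: the original list of all businesses
--     :return: the list of the businesses with their check-ins
--     """
--     topTen = sortedCountList[-10:]
--     finalTopTen = []
--     for index in range(len(topTen)):
--         for innerIndex in range(len(mainList)):
--             if topTen[index][0] == mainList[innerIndex][0]:
--                 finalTopTen.append(mainList[innerIndex])
--     return finalTopTen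
-- ===== SOURCE B (Python) =====
-- def findTopTen(sortedCountList, mainList):
--     """
--     For the top ten businesses, find the count of check-ins from the original list
--     (index-based re-implementation: one grouping pass over mainList, then lookups).
--     """
--     groups = {}
--     for entry in mainList:
--         groups.setdefault(entry[0], []).append(entry)
--     finalTopTen = []
--     for key in sortedCountList[-10:]:
--         finalTopTen.extend(groups.get(key[0], []))
--     return finalTopTen
-- ===== Notes on version B (the rewrite author's own statement) =====
-- stated objective: idiomatic
-- what changed: Replaced the nested index scan (one full pass over mainList per top-ten key) by a single grouping pass building a dict key -> matching entries, then one dict lookup per top-ten key.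
import Mathlib
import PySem

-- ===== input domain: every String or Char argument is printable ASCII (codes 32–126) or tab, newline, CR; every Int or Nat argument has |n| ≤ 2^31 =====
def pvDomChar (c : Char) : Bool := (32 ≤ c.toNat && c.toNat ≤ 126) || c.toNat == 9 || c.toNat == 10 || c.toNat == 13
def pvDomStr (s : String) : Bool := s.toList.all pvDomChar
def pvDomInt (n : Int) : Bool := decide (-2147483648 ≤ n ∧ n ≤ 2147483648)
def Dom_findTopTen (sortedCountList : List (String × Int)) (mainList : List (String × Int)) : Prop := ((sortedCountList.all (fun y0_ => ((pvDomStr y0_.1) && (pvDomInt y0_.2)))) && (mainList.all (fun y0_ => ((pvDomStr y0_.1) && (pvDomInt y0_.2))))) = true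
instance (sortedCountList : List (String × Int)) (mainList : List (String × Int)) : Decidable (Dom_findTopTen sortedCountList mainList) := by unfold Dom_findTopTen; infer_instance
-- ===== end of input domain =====

-- B replaces A's per-key rescan of mainList by one grouping pass (dict key -> entries) and a lookup per top-ten key.

-- ===== PORT A =====
def findTopTen (sortedCountList : List (String × Int)) (mainList : List (String × Int)) : List (String × Int) :=
  let topTen := PySem.List.slice sortedCountList (some (-10)) none
  (PySem.List.pyRange 0 (topTen.length : Int) 1).foldl (fun finalTopTen index =>
    (PySem.List.pyRange 0 (mainList.length : Int) 1).foldl (fun acc innerIndex =>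
      if (PySem.List.pyGetD topTen index ("", 0)).1 == (PySem.List.pyGetD mainList innerIndex ("", 0)).1
      then acc ++ [PySem.List.pyGetD mainList innerIndex ("", 0)]
      else acc) finalTopTen) []

-- ===== PORT B =====
def findTopTen_alt (sortedCountList : List (String × Int)) (mainList : List (String × Int)) : List (String × Int) :=
  let groups : PySem.Dict String (List (String × Int)) :=
    mainList.foldl (fun d entry => d.modify entry.1 [] (fun l => l ++ [entry])) PySem.Dict.empty
  (PySem.List.slice sortedCountList (some (-10)) none).foldl
    (fun finalTopTen key => finalTopTen ++ groups.getD key.1 []) []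

-- ===== PRECONDITION & SPEC =====
def Spec_findTopTen (sortedCountList : List (String × Int)) (mainList : List (String × Int)) (out : List (String × Int)) : Prop := out = findTopTen_alt sortedCountList mainList
instance (sortedCountList : List (String × Int)) (mainList : List (String × Int)) (out : List (String × Int)) : Decidable (Spec_findTopTen sortedCountList mainList out) := by unfold Spec_findTopTen; infer_instance

-- ===== CLAIM (what is proved, stated in full; the proofs are below) =====
def Claim_equal_findTopTen : Prop := ∀ (sortedCountList : List (String × Int)) (mainList : List (String × Int)), Dom_findTopTen sortedCountList mainList → Spec_findTopTen sortedCountList mainList (findTopTen sortedCountList mainList)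

-- ===== LEMMAS AND PROOFS =====

-- The grouping dict looks up to exactly the in-order filter of mainList.
theorem getD_group_foldl (l : List (String × Int)) (d : PySem.Dict String (List (String × Int)))
    (c : String) :
    (l.foldl (fun d entry => d.modify entry.1 [] (fun l => l ++ [entry])) d).getD c []
      = d.getD c [] ++ l.filter (fun e => e.1 == c) := by
  induction l generalizing d with
  | nil => simp
  | cons x t ih =>
    simp only [List.foldl_cons, List.filter_cons, ih]
    rw [PySem.Dict.getD_modify]
    by_cases h : c = x.1
    · simp [h]
    · have : (x.1 == c) = false := by simp [Ne.symm h]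
      simp [h, this]

theorem findTopTen_spec_aux (sortedCountList mainList : List (String × Int)) :
    findTopTen sortedCountList mainList = findTopTen_alt sortedCountList mainList := by
  simp only [findTopTen, findTopTen_alt]
  rw [PySem.List.foldl_pyRange_zero_pyGetD' (PySem.List.slice sortedCountList (some (-10)) none) ("", 0)
      (f := fun acc t => (PySem.List.pyRange 0 (mainList.length : Int) 1).foldl
        (fun acc2 j => if t.1 == (PySem.List.pyGetD mainList j ("", 0)).1
          then acc2 ++ [PySem.List.pyGetD mainList j ("", 0)] else acc2) acc) (init := [])]
  refine Eq.trans (PySem.List.foldl_congr_mem _ _ (fun acc t => acc ++ mainList.filter (fun e => t.1 == e.1)) [] ?_) ?_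
  · intro acc t _
    rw [PySem.List.foldl_pyRange_zero_pyGetD' mainList ("", 0)
        (f := fun acc e => if t.1 == e.1 then acc ++ [e] else acc)]
    exact PySem.List.foldl_append_if_eq_filter _ _ _
  · refine PySem.List.foldl_congr_mem _ _ _ [] ?_
    intro acc t _
    rw [getD_group_foldl]
    simp only [PySem.Dict.getD_empty, List.nil_append]
    congr 1
    apply List.filter_congr
    intro e _
    simp [BEq.comm]

-- ===== VERDICT (by name: the statement is the Claim_ definition above) =====
theorem findTopTen_spec : Claim_equal_findTopTen := by
  intro scl ml _
  exact findTopTen_spec_aux scl ml
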